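-- pv_equiv track=rewrite | github.com/OvidiuBocanci/Robot_Arm | servo_motors.py | list_of_moves
-- ===== SOURCE A (Python) =====
-- def list_of_moves(moves_list):
--
--     new_list=[]
--     prev_pos = 0
--     for index, pos in enumerate(moves_list):
--         if index == 0:
--
--             new_list.append(pos)
--             prev_pos = pos
--
--         else:
--             value_stepper, value_servo1, value_servo2, value_servo3, value_servo4, value_servo5 = prev_pos
--             value_stepper = pos[0]
--             dif1 = prev_pos[1]-pos[1]
--             dif2 = prev_pos[2]-pos[2]
--             dif3 = prev_pos[3]-pos[3]
--             dif4 = prev_pos[4]-pos[4]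
--             dif5 = prev_pos[5]-pos[5]
--             dif_list = [dif1, dif2, dif3, dif4, dif5]
--             max_dif = max(abs(num) for num in dif_list)
--
--             if max_dif == 0:
--                 new_list.append((value_stepper, value_servo1, value_servo2, value_servo3, value_servo4, value_servo5))
--             else:
--                 for nr in range(max_dif):
--
--                     if dif1 < 0:
--                         value_servo1 += 1
--                         dif1 = value_servo1 - pos[1]
--                     elif dif1 > 0:
--                         value_servo1 -= 1
--                         dif1 = value_servo1 - pos[1]
--
--                     if dif2 < 0:
--                         value_servo2 += 1
--                         dif2 = value_servo2 - pos[2]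
--                     elif dif2 > 0:
--                         value_servo2 -= 1
--                         dif2 = value_servo2 - pos[2]
--
--                     if dif3 < 0:
--                         value_servo3 += 1
--                         dif3 = value_servo3 - pos[3]
--                     elif dif3 > 0:
--                         value_servo3 -= 1
--                         dif3 = value_servo3 - pos[3]
--
--                     if dif4 < 0:
--                         value_servo4 += 1
--                         dif4 = value_servo4 - pos[4]
--                     elif dif4 > 0:
--                         value_servo4 -= 1
--                         dif4 = value_servo4 - pos[4]
--
--                     if dif5 < 0:
--                         value_servo5 += 1
--                         dif5 = value_servo5 - pos[5]
--                     elif dif5 > 0: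
--                         value_servo5 -= 1
--                         dif5 = value_servo5 - pos[5]
--                     new_list.append((value_stepper, value_servo1, value_servo2, value_servo3, value_servo4, value_servo5))
--             prev_pos = pos
--     return new_list
-- ===== SOURCE B (Python) =====
-- def _approach(p, q, k):
--     # position after k unit steps from p towards q (closed form)
--     return p + min(k, q - p) if p < q else p - min(k, p - q)
--
--
-- def list_of_moves(moves_list):
--     if not moves_list:
--         return []
--     out = [moves_list[0]]
--     prev = moves_list[0]
--     for pos in moves_list[1:]:
--         max_dif = max(abs(prev[i] - pos[i]) for i in range(1, 6))
--         if max_dif == 0: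
--             out.append((pos[0], prev[1], prev[2], prev[3], prev[4], prev[5]))
--         else:
--             for k in range(1, max_dif + 1):
--                 out.append((pos[0],
--                             _approach(prev[1], pos[1], k),
--                             _approach(prev[2], pos[2], k),
--                             _approach(prev[3], pos[3], k),
--                             _approach(prev[4], pos[4], k),
--                             _approach(prev[5], pos[5], k)))
--         prev = pos
--     return out
-- ===== Notes on version B (the rewrite author's own statement) =====
-- stated objective: simpler
-- what changed: B replaces A's stateful inner loop (which mutates five servo values and five difference variables step by step) with a closed-form per-step position start_i + sign_i*min(k,|dif_i|) mapped over range(1,max_dif+1), and iterates over consecutive pairs instead of enumerate with an index==0 branch.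
import Mathlib
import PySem

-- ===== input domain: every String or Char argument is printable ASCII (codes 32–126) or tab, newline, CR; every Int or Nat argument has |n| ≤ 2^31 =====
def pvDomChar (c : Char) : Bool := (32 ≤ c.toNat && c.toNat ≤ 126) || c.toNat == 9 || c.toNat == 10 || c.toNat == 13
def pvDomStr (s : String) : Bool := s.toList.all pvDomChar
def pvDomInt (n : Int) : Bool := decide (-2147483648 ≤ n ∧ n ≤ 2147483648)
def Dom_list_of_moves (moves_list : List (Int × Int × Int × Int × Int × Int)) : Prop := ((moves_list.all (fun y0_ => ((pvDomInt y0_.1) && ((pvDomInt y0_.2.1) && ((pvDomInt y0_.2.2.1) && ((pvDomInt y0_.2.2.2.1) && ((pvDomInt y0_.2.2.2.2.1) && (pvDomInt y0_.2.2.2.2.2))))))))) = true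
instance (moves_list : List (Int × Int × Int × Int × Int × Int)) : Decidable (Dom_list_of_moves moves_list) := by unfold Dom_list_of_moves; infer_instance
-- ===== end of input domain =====

-- B replaces A's stateful ±1-stepping inner loop by a closed-form position
-- start + sign*min(k,|dif|) mapped over range(1, max_dif+1): simpler decomposition, same cost.

-- ===== PORT A =====
-- the inner 'for nr in range(max_dif)' loop of A: state = five servo values and
-- five carried difference variables, one tuple appended per iteration
def pvAInner (fuel : Nat) (stp t1 t2 t3 t4 t5 v1 v2 v3 v4 v5 d1 d2 d3 d4 d5 : Int)
    (acc : List (Int × Int × Int × Int × Int × Int)) : List (Int × Int × Int × Int × Int × Int) :=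
  match fuel with
  | 0 => acc
  | Nat.succ n =>
    let p1 := if d1 < 0 then (v1 + 1, v1 + 1 - t1) else if d1 > 0 then (v1 - 1, v1 - 1 - t1) else (v1, d1)
    let p2 := if d2 < 0 then (v2 + 1, v2 + 1 - t2) else if d2 > 0 then (v2 - 1, v2 - 1 - t2) else (v2, d2)
    let p3 := if d3 < 0 then (v3 + 1, v3 + 1 - t3) else if d3 > 0 then (v3 - 1, v3 - 1 - t3) else (v3, d3)
    let p4 := if d4 < 0 then (v4 + 1, v4 + 1 - t4) else if d4 > 0 then (v4 - 1, v4 - 1 - t4) else (v4, d4)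
    let p5 := if d5 < 0 then (v5 + 1, v5 + 1 - t5) else if d5 > 0 then (v5 - 1, v5 - 1 - t5) else (v5, d5)
    pvAInner n stp t1 t2 t3 t4 t5 p1.1 p2.1 p3.1 p4.1 p5.1 p1.2 p2.2 p3.2 p4.2 p5.2
      (acc ++ [(stp, p1.1, p2.1, p3.1, p4.1, p5.1)])

-- the body of A's 'for index, pos in enumerate(moves_list)'
def pvAStep (st : List (Int × Int × Int × Int × Int × Int) × (Int × Int × Int × Int × Int × Int))
    (ip : Int × (Int × Int × Int × Int × Int × Int)) :
    List (Int × Int × Int × Int × Int × Int) × (Int × Int × Int × Int × Int × Int) :=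
  let new_list := st.1
  let prev_pos := st.2
  let index := ip.1
  let pos := ip.2
  if index = 0 then (new_list ++ [pos], pos)
  else
    let d1 := prev_pos.2.1 - pos.2.1
    let d2 := prev_pos.2.2.1 - pos.2.2.1
    let d3 := prev_pos.2.2.2.1 - pos.2.2.2.1
    let d4 := prev_pos.2.2.2.2.1 - pos.2.2.2.2.1
    let d5 := prev_pos.2.2.2.2.2 - pos.2.2.2.2.2
    let max_dif := |d1| ⊔ |d2| ⊔ |d3| ⊔ |d4| ⊔ |d5|
    if max_dif = 0 then
      (new_list ++ [(pos.1, prev_pos.2.1, prev_pos.2.2.1, prev_pos.2.2.2.1, prev_pos.2.2.2.2.1, prev_pos.2.2.2.2.2)], pos)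
    else
      (pvAInner max_dif.toNat pos.1 pos.2.1 pos.2.2.1 pos.2.2.2.1 pos.2.2.2.2.1 pos.2.2.2.2.2
        prev_pos.2.1 prev_pos.2.2.1 prev_pos.2.2.2.1 prev_pos.2.2.2.2.1 prev_pos.2.2.2.2.2
        d1 d2 d3 d4 d5 new_list, pos)

-- Python's initial 'prev_pos = 0' is a never-read placeholder (index 0 overwrites it);
-- the dummy tuple below plays the same role
def list_of_moves (moves_list : List (Int × Int × Int × Int × Int × Int)) : List (Int × Int × Int × Int × Int × Int) :=
  ((PySem.List.enumerate moves_list 0).foldl pvAStep ([], (0, 0, 0, 0, 0, 0))).1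

-- ===== PORT B =====
def pvApproach (p q k : Int) : Int :=
  if p < q then p + min k (q - p) else p - min k (p - q)

def pvBlock (prev pos : Int × Int × Int × Int × Int × Int) : List (Int × Int × Int × Int × Int × Int) :=
  let max_dif := |prev.2.1 - pos.2.1| ⊔ |prev.2.2.1 - pos.2.2.1| ⊔ |prev.2.2.2.1 - pos.2.2.2.1|
      ⊔ |prev.2.2.2.2.1 - pos.2.2.2.2.1| ⊔ |prev.2.2.2.2.2 - pos.2.2.2.2.2|
  if max_dif = 0 then [(pos.1, prev.2.1, prev.2.2.1, prev.2.2.2.1, prev.2.2.2.2.1, prev.2.2.2.2.2)]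
  else (PySem.List.pyRange 1 (max_dif + 1) 1).map (fun k =>
    (pos.1, pvApproach prev.2.1 pos.2.1 k, pvApproach prev.2.2.1 pos.2.2.1 k,
     pvApproach prev.2.2.2.1 pos.2.2.2.1 k, pvApproach prev.2.2.2.2.1 pos.2.2.2.2.1 k,
     pvApproach prev.2.2.2.2.2 pos.2.2.2.2.2 k))

def list_of_moves_alt (moves_list : List (Int × Int × Int × Int × Int × Int)) : List (Int × Int × Int × Int × Int × Int) :=
  match moves_list with
  | [] => []
  | first :: rest =>
    (rest.foldl (fun (st : List (Int × Int × Int × Int × Int × Int) × (Int × Int × Int × Int × Int × Int)) pos =>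
        (st.1 ++ pvBlock st.2 pos, pos)) ([first], first)).1

-- ===== PRECONDITION & SPEC =====
def Spec_list_of_moves (moves_list : List (Int × Int × Int × Int × Int × Int)) (out : List (Int × Int × Int × Int × Int × Int)) : Prop := out = list_of_moves_alt moves_list
instance (moves_list : List (Int × Int × Int × Int × Int × Int)) (out : List (Int × Int × Int × Int × Int × Int)) : Decidable (Spec_list_of_moves moves_list out) := by unfold Spec_list_of_moves; infer_instance

-- ===== CLAIM (what is proved, stated in full; the proofs are below) =====
def Claim_equal_list_of_moves : Prop := ∀ (moves_list : List (Int × Int × Int × Int × Int × Int)), Dom_list_of_moves moves_list → Spec_list_of_moves moves_list (list_of_moves moves_list)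

-- ===== LEMMAS AND PROOFS =====

-- one ±1 step of A's inner loop, as a function of the value and its target
def pvStep (v t : Int) : Int :=
  if v - t < 0 then v + 1 else if v - t > 0 then v - 1 else v

theorem pvStep_eq_approach_one (v t : Int) : pvStep v t = pvApproach v t 1 := by
  unfold pvStep pvApproach; split_ifs <;> omega

theorem pvApproach_shift (v t k : Int) (hk : 0 ≤ k) :
    pvApproach (pvStep v t) t k = pvApproach v t (k + 1) := by
  unfold pvStep pvApproach; split_ifs <;> omega

theorem pvPair_char (v t : Int) :
    (if v - t < 0 then (v + 1, v + 1 - t) else if v - t > 0 then (v - 1, v - 1 - t) else (v, v - t))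
      = (pvStep v t, pvStep v t - t) := by
  unfold pvStep; split_ifs <;> simp

theorem pvAInner_eq (n : Nat) (stp t1 t2 t3 t4 t5 : Int) :
    ∀ (v1 v2 v3 v4 v5 : Int) (acc : List (Int × Int × Int × Int × Int × Int)),
    pvAInner n stp t1 t2 t3 t4 t5 v1 v2 v3 v4 v5 (v1 - t1) (v2 - t2) (v3 - t3) (v4 - t4) (v5 - t5) acc
      = acc ++ (List.range n).map (fun (j : Nat) =>
          (stp, pvApproach v1 t1 ((j : Int) + 1), pvApproach v2 t2 ((j : Int) + 1), pvApproach v3 t3 ((j : Int) + 1),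
           pvApproach v4 t4 ((j : Int) + 1), pvApproach v5 t5 ((j : Int) + 1))) := by
  induction n with
  | zero => intro v1 v2 v3 v4 v5 acc; simp [pvAInner]
  | succ n ih =>
    intro v1 v2 v3 v4 v5 acc
    rw [show pvAInner (Nat.succ n) stp t1 t2 t3 t4 t5 v1 v2 v3 v4 v5
          (v1 - t1) (v2 - t2) (v3 - t3) (v4 - t4) (v5 - t5) acc
        = pvAInner n stp t1 t2 t3 t4 t5 (pvStep v1 t1) (pvStep v2 t2) (pvStep v3 t3) (pvStep v4 t4) (pvStep v5 t5)
          (pvStep v1 t1 - t1) (pvStep v2 t2 - t2) (pvStep v3 t3 - t3) (pvStep v4 t4 - t4) (pvStep v5 t5 - t5)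
          (acc ++ [(stp, pvStep v1 t1, pvStep v2 t2, pvStep v3 t3, pvStep v4 t4, pvStep v5 t5)]) from by
      simp only [pvAInner, pvPair_char]]
    rw [ih]
    rw [List.range_succ_eq_map]
    simp only [List.map_cons, List.map_map, List.append_assoc, List.singleton_append]
    congr 1
    simp [pvStep_eq_approach_one]
    intro a _
    refine ⟨?_, ?_, ?_, ?_, ?_⟩ <;>
      (rw [← pvStep_eq_approach_one]; exact pvApproach_shift _ _ _ (by positivity))

theorem pvBlock_map (prev pos : Int × Int × Int × Int × Int × Int) (md : Int) :
    (PySem.List.pyRange 1 (md + 1) 1).map (fun k =>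
      (pos.1, pvApproach prev.2.1 pos.2.1 k, pvApproach prev.2.2.1 pos.2.2.1 k,
       pvApproach prev.2.2.2.1 pos.2.2.2.1 k, pvApproach prev.2.2.2.2.1 pos.2.2.2.2.1 k,
       pvApproach prev.2.2.2.2.2 pos.2.2.2.2.2 k))
    = (List.range md.toNat).map (fun (j : Nat) =>
      (pos.1, pvApproach prev.2.1 pos.2.1 ((j : Int) + 1), pvApproach prev.2.2.1 pos.2.2.1 ((j : Int) + 1),
       pvApproach prev.2.2.2.1 pos.2.2.2.1 ((j : Int) + 1), pvApproach prev.2.2.2.2.1 pos.2.2.2.2.1 ((j : Int) + 1),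
       pvApproach prev.2.2.2.2.2 pos.2.2.2.2.2 ((j : Int) + 1))) := by
  rw [PySem.List.pyRange_one]
  rw [show (md + 1 - 1).toNat = md.toNat by omega]
  rw [List.map_map]
  apply List.map_congr_left
  intro j _
  simp only [Function.comp_apply]
  rw [add_comm 1 (j : Int)]

theorem pvAStep_eq (st : List (Int × Int × Int × Int × Int × Int) × (Int × Int × Int × Int × Int × Int))
    (ip : Int × (Int × Int × Int × Int × Int × Int)) (h : ip.1 ≠ 0) :
    pvAStep st ip = (st.1 ++ pvBlock st.2 ip.2, ip.2) := by
  obtain ⟨acc, prev⟩ := st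
  obtain ⟨idx, pos⟩ := ip
  simp only [pvAStep, pvBlock]
  rw [if_neg (by simpa using h)]
  split_ifs with hmd
  · simp
  · rw [pvAInner_eq, pvBlock_map prev pos]

theorem pvFold_shift (rest : List (Int × Int × Int × Int × Int × Int)) :
    ∀ (c : Int), 1 ≤ c → ∀ (acc : List (Int × Int × Int × Int × Int × Int)) (prev : Int × Int × Int × Int × Int × Int),
    (PySem.List.enumerate rest c).foldl pvAStep (acc, prev)
      = rest.foldl (fun (st : List (Int × Int × Int × Int × Int × Int) × (Int × Int × Int × Int × Int × Int)) pos =>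
          (st.1 ++ pvBlock st.2 pos, pos)) (acc, prev) := by
  induction rest with
  | nil => intro c _ acc prev; simp [PySem.List.enumerate_nil]
  | cons x xs ih =>
    intro c hc acc prev
    rw [PySem.List.enumerate_cons]
    simp only [List.foldl_cons]
    rw [pvAStep_eq (acc, prev) (c, x) (by simpa using (by omega : c ≠ 0))]
    exact ih (c + 1) (by omega) _ _

theorem list_of_moves_eq_alt (moves_list : List (Int × Int × Int × Int × Int × Int)) :
    list_of_moves moves_list = list_of_moves_alt moves_list := by
  cases moves_list with
  | nil => simp [list_of_moves, list_of_moves_alt, PySem.List.enumerate_nil]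
  | cons first rest =>
    unfold list_of_moves list_of_moves_alt
    rw [PySem.List.enumerate_cons]
    simp only [List.foldl_cons, zero_add]
    rw [show pvAStep ([], (0, 0, 0, 0, 0, 0)) (0, first) = ([first], first) by simp [pvAStep]]
    rw [pvFold_shift rest 1 le_rfl [first] first]

-- ===== VERDICT (by name: the statement is the Claim_ definition above) =====
theorem list_of_moves_spec : Claim_equal_list_of_moves := by
  intro moves_list _
  unfold Spec_list_of_moves
  exact list_of_moves_eq_alt moves_list
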